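-- pv_equiv track=rewrite | github.com/S-Christensen/cartographersStudy | scoringCards.py | ulemswallow
-- ===== SOURCE A (Python) =====
-- def ulemswallow(grid):
--     def is_farm(r, c):
--         return 0 <= r < len(grid) and 0 <= c < len(grid[0]) and grid[r][c] == "farm"
--
--     def count_adjacent_farms(r, c):
--         farm_count = 0
--         for dr, dc in [(-1, 0), (1, 0), (0, -1), (0, 1)]:
--             nr, nc = r + dr, c + dc
--             if is_farm(nr, nc):
--                 farm_count += 1
--         return farm_count
--
--     water_count = 0
--
--     for r in range(len(grid)):
--         for c in range(len(grid[0])):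
--             if grid[r][c] == "water" and count_adjacent_farms(r, c) >= 2:
--                 water_count += 1
--
--     return water_count*4
-- ===== SOURCE B (Python) =====
-- def ulemswallow(grid):
--     R = len(grid)
--     if R == 0:
--         return 0
--     C = len(grid[0])
--     count = {}
--     # scatter: every farm cell increments the count of each of its in-bounds neighbors
--     for r in range(R):
--         for c in range(C):
--             if grid[r][c] == "farm":
--                 for nr, nc in ((r - 1, c), (r + 1, c), (r, c - 1), (r, c + 1)):
--                     if 0 <= nr < R and 0 <= nc < C:
--                         count[(nr, nc)] = count.get((nr, nc), 0) + 1
--     total = 0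
--     for r in range(R):
--         for c in range(C):
--             if grid[r][c] == "water" and count.get((r, c), 0) >= 2:
--                 total += 1
--     return total * 4
-- ===== Notes on version B (the rewrite author's own statement) =====
-- stated objective: alternative
-- what changed: B scatters: one pass increments a per-cell neighbor-farm count table from each farm cell, then a second pass counts water cells with count >= 2, instead of A's gather that re-probes all four neighbors at every cell.
import Mathlib
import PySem

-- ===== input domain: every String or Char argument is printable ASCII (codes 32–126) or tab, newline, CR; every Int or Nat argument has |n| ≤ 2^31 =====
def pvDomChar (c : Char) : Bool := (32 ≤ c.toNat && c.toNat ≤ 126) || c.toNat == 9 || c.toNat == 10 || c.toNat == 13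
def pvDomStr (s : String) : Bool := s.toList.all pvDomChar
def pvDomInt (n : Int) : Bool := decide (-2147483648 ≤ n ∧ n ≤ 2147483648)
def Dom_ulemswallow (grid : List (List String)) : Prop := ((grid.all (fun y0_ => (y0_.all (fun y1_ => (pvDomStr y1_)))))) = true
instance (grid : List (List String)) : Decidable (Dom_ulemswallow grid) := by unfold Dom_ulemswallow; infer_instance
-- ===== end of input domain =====

-- B scatters: one pass builds a neighbor-farm count dictionary from the farm cells, then a second
-- pass counts water cells with count >= 2, replacing A's per-cell gather of all four neighbors
-- (an alternative decomposition of the same O(R*C) task, not claimed faster).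


-- ===== PORT A =====
-- grid[r][c] via pyGetD: exact on inputs admitted by Pre_ (every reached index is in range);
-- grid[0] via headD []: in Python it is evaluated only once the r-loop runs, i.e. grid ≠ [].
def pvCell (grid : List (List String)) (r c : Int) : String :=
  PySem.List.pyGetD (PySem.List.pyGetD grid r []) c ""

def pvIsFarm (grid : List (List String)) (r c : Int) : Bool :=
  decide (0 ≤ r) && decide (r < (grid.length : Int)) && decide (0 ≤ c)
    && decide (c < ((grid.headD []).length : Int)) && (pvCell grid r c == "farm")

def pvCountAdjacentFarms (grid : List (List String)) (r c : Int) : Int :=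
  [((-1 : Int), (0 : Int)), (1, 0), (0, -1), (0, 1)].foldl
    (fun fc d => if pvIsFarm grid (r + d.1) (c + d.2) then fc + 1 else fc) 0

def ulemswallow (grid : List (List String)) : Int :=
  ((PySem.List.pyRange 0 (grid.length : Int) 1).foldl (fun acc r =>
    (PySem.List.pyRange 0 ((grid.headD []).length : Int) 1).foldl (fun acc c =>
      if pvCell grid r c == "water" && decide (2 ≤ pvCountAdjacentFarms grid r c)
      then acc + 1 else acc) acc) 0) * 4

-- ===== PORT B =====
-- count is a Python dict keyed by coordinate pairs; count[(nr,nc)] = count.get((nr,nc),0)+1 is Dict.modify.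
def ulemswallow_alt (grid : List (List String)) : Int :=
  let R : Int := grid.length
  if R == 0 then 0 else
    let C : Int := (grid.headD []).length
    let count : PySem.Dict (Int × Int) Int :=
      (PySem.List.pyRange 0 R 1).foldl (fun d r =>
        (PySem.List.pyRange 0 C 1).foldl (fun d c =>
          if pvCell grid r c == "farm" then
            [(r - 1, c), (r + 1, c), (r, c - 1), (r, c + 1)].foldl (fun d p =>
              if decide (0 ≤ p.1) && decide (p.1 < R) && decide (0 ≤ p.2) && decide (p.2 < C)
              then d.modify p 0 (· + 1) else d) d
          else d) d) PySem.Dict.empty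
    ((PySem.List.pyRange 0 R 1).foldl (fun acc r =>
      (PySem.List.pyRange 0 C 1).foldl (fun acc c =>
        if pvCell grid r c == "water" && decide (2 ≤ count.getD (r, c) 0)
        then acc + 1 else acc) acc) 0) * 4

-- ===== PRECONDITION & SPEC =====
-- Pre_ excludes exactly the ragged grids on which Python A raises IndexError:
-- some row shorter than row 0, so grid[r][c] with c < len(grid[0]) goes out of range.
def Pre_ulemswallow (grid : List (List String)) : Prop :=
  ∀ row ∈ grid, (grid.headD []).length ≤ row.length
instance (grid : List (List String)) : Decidable (Pre_ulemswallow grid) := by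
  unfold Pre_ulemswallow; infer_instance

def pvWitness_ulemswallow : List (List String) :=
  [["water", "farm", "water"], ["farm", "water", "farm"]]

def Spec_ulemswallow (grid : List (List String)) (out : Int) : Prop := out = ulemswallow_alt grid
instance (grid : List (List String)) (out : Int) : Decidable (Spec_ulemswallow grid out) := by
  unfold Spec_ulemswallow; infer_instance

-- ===== CLAIM (what is proved, stated in full; the proofs are below) =====
def Claim_equal_ulemswallow : Prop := ∀ (grid : List (List String)), Dom_ulemswallow grid → Pre_ulemswallow grid → Spec_ulemswallow grid (ulemswallow grid)

-- ===== LEMMAS AND PROOFS =====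

-- the coordinates B's scatter pass increments, one list entry per increment
def pvKeys (grid : List (List String)) : List (Int × Int) :=
  (PySem.List.pyRange 0 (grid.length : Int) 1).flatMap (fun r =>
    (PySem.List.pyRange 0 ((grid.headD []).length : Int) 1).flatMap (fun c =>
      if pvCell grid r c == "farm" then
        [(r - 1, c), (r + 1, c), (r, c - 1), (r, c + 1)].filter (fun p =>
          decide (0 ≤ p.1) && decide (p.1 < (grid.length : Int)) && decide (0 ≤ p.2)
            && decide (p.2 < ((grid.headD []).length : Int)))
      else []))

-- B's scatter dictionary is the increment-counting fold over pvKeys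
lemma dict_eq (grid : List (List String)) :
    ((PySem.List.pyRange 0 (grid.length : Int) 1).foldl (fun d r =>
      (PySem.List.pyRange 0 ((grid.headD []).length : Int) 1).foldl (fun d c =>
        if pvCell grid r c == "farm" then
          [(r - 1, c), (r + 1, c), (r, c - 1), (r, c + 1)].foldl (fun d p =>
            if decide (0 ≤ p.1) && decide (p.1 < (grid.length : Int)) && decide (0 ≤ p.2)
              && decide (p.2 < ((grid.headD []).length : Int))
            then d.modify p 0 (· + 1) else d) d
        else d) d) (PySem.Dict.empty : PySem.Dict (Int × Int) Int))
    = (pvKeys grid).foldl (fun d k => d.modify k 0 (· + 1)) PySem.Dict.empty := by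
  rw [pvKeys, List.foldl_flatMap]
  apply List.foldl_ext
  intro d r _
  rw [List.foldl_flatMap]
  apply List.foldl_ext
  intro d c _
  by_cases hf : (pvCell grid r c == "farm") = true
  · simp only [hf, if_true, List.foldl_filter]
  · simp only [hf, if_false, Bool.false_eq_true, List.foldl_nil]

lemma count_flatMap {α β : Type} [BEq β] (l : List α) (h : α → List β) (a : β) :
    ((l.flatMap h).count a : Int) = (l.map (fun x => ((h x).count a : Int))).sum := by
  induction l with
  | nil => simp
  | cons x xs ih => simp [List.count_append, ih]

lemma percell (grid : List (List String)) (i j : Int)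
    (hi0 : 0 ≤ i) (hiR : i < (grid.length : Int))
    (hj0 : 0 ≤ j) (hjC : j < ((grid.headD []).length : Int)) (r c : Int) :
    (((if pvCell grid r c == "farm" then
        [(r - 1, c), (r + 1, c), (r, c - 1), (r, c + 1)].filter (fun p =>
          decide (0 ≤ p.1) && decide (p.1 < (grid.length : Int)) && decide (0 ≤ p.2)
            && decide (p.2 < ((grid.headD []).length : Int)))
      else []).count (i, j) : Nat) : Int)
    = (if ((pvCell grid r c == "farm") = true ∧ r = i + 1) ∧ c = j then (1 : Int) else 0)
      + ((if ((pvCell grid r c == "farm") = true ∧ r = i - 1) ∧ c = j then (1 : Int) else 0)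
      + ((if ((pvCell grid r c == "farm") = true ∧ r = i) ∧ c = j + 1 then (1 : Int) else 0)
      + (if ((pvCell grid r c == "farm") = true ∧ r = i) ∧ c = j - 1 then (1 : Int) else 0))) := by
  by_cases hF : (pvCell grid r c == "farm") = true
  · rw [if_pos hF,
      List.count_filter (by simp only [Bool.and_eq_true, decide_eq_true_eq]; exact ⟨⟨⟨hi0, hiR⟩, hj0⟩, hjC⟩)]
    simp only [List.count_cons, List.count_nil, beq_iff_eq, Prod.mk.injEq, hF, true_and]
    push_cast
    split_ifs <;> omega
  · rw [if_neg hF]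
    simp only [List.count_nil, Nat.cast_zero]
    rw [if_neg (fun h => hF h.1.1), if_neg (fun h => hF h.1.1),
      if_neg (fun h => hF h.1.1), if_neg (fun h => hF h.1.1)]
    norm_num

lemma sum_range_ite_and (n : Nat) (t : Int) (P : Nat → Prop) [DecidablePred P] :
    ((List.range n).map (fun k => if P k ∧ (k : Int) = t then (1 : Int) else 0)).sum
      = if 0 ≤ t ∧ t < (n : Int) ∧ P t.toNat then 1 else 0 := by
  induction n with
  | zero =>
      simp only [List.range_zero, List.map_nil, List.sum_nil]
      rw [if_neg (by push_cast; omega)]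
  | succ m ih =>
      rw [List.range_succ, List.map_append, List.sum_append, ih]
      simp only [List.map_cons, List.map_nil, List.sum_cons, List.sum_nil, add_zero]
      by_cases hm : (m : Int) = t
      · have hmt : t.toNat = m := by omega
        rw [if_neg (show ¬(0 ≤ t ∧ t < (m : Int) ∧ P t.toNat) from by rintro ⟨-, h, -⟩; omega)]
        by_cases hp : P m
        · rw [if_pos ⟨hp, hm⟩,
            if_pos (show 0 ≤ t ∧ t < ((m + 1 : Nat) : Int) ∧ P t.toNat from
              ⟨by omega, by push_cast; omega, hmt ▸ hp⟩)]
          norm_num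
        · rw [if_neg (show ¬(P m ∧ (m : Int) = t) from fun h => hp h.1),
            if_neg (show ¬(0 ≤ t ∧ t < ((m + 1 : Nat) : Int) ∧ P t.toNat) from by
              rintro ⟨-, -, h⟩; exact hp (hmt ▸ h))]
          norm_num
      · rw [if_neg (show ¬(P m ∧ (m : Int) = t) from fun h => hm h.2)]
        by_cases hC : 0 ≤ t ∧ t < (m : Int) ∧ P t.toNat
        · rw [if_pos hC,
            if_pos (show 0 ≤ t ∧ t < ((m + 1 : Nat) : Int) ∧ P t.toNat from
              ⟨hC.1, by push_cast; omega, hC.2.2⟩)]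
          norm_num
        · rw [if_neg hC,
            if_neg (show ¬(0 ≤ t ∧ t < ((m + 1 : Nat) : Int) ∧ P t.toNat) from by
              rintro ⟨a, b, c⟩; exact hC ⟨a, by push_cast at b; omega, c⟩)]
          norm_num



lemma scatter_one (grid : List (List String)) (a b : Int) :
    ((List.range grid.length).map (fun (r : Nat) =>
      ((List.range (grid.headD []).length).map (fun (c : Nat) =>
        if ((pvCell grid (r : Int) (c : Int) == "farm") = true ∧ (r : Int) = a) ∧ (c : Int) = b
        then (1 : Int) else 0)).sum)).sum
      = if pvIsFarm grid a b = true then 1 else 0 := by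
  have hin : ∀ r : Nat,
      ((List.range (grid.headD []).length).map (fun (c : Nat) =>
        if ((pvCell grid (r : Int) (c : Int) == "farm") = true ∧ (r : Int) = a) ∧ (c : Int) = b
        then (1 : Int) else 0)).sum
      = if 0 ≤ b ∧ b < ((grid.headD []).length : Int) ∧
          ((pvCell grid r (b.toNat) == "farm") = true ∧ (r : Int) = a) then 1 else 0 :=
    fun r => sum_range_ite_and (grid.headD []).length b
      (fun (c : Nat) => (pvCell grid (r : Int) (c : Int) == "farm") = true ∧ (r : Int) = a)
  simp only [hin]
  have hiff : ∀ r : Nat,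
      (0 ≤ b ∧ b < ((grid.headD []).length : Int) ∧
        ((pvCell grid ((r : Nat) : Int) ((b.toNat : Nat) : Int) == "farm") = true ∧ (r : Int) = a))
      ↔ ((0 ≤ b ∧ b < ((grid.headD []).length : Int) ∧
          (pvCell grid ((r : Nat) : Int) ((b.toNat : Nat) : Int) == "farm") = true) ∧ (r : Int) = a) := by
    intro r; tauto
  simp only [hiff]
  rw [sum_range_ite_and]
  refine if_congr ?_ rfl rfl
  simp only [pvIsFarm, Bool.and_eq_true, decide_eq_true_eq]
  constructor
  · rintro ⟨ha0, haR, hb0, hbC, hf⟩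
    refine ⟨⟨⟨⟨ha0, haR⟩, hb0⟩, hbC⟩, ?_⟩
    rwa [Int.toNat_of_nonneg ha0, Int.toNat_of_nonneg hb0] at hf
  · rintro ⟨⟨⟨⟨ha0, haR⟩, hb0⟩, hbC⟩, hf⟩
    exact ⟨ha0, haR, hb0, hbC, by rwa [Int.toNat_of_nonneg ha0, Int.toNat_of_nonneg hb0]⟩

lemma keys_count (grid : List (List String)) (i j : Int)
    (hi0 : 0 ≤ i) (hiR : i < (grid.length : Int))
    (hj0 : 0 ≤ j) (hjC : j < ((grid.headD []).length : Int)) :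
    ((pvKeys grid).count (i, j) : Int) = pvCountAdjacentFarms grid i j := by
  rw [pvKeys, count_flatMap]
  simp only [count_flatMap]
  simp only [PySem.List.pyRange_zero_natCast, List.map_map, Function.comp_def]
  simp only [percell grid i j hi0 hiR hj0 hjC]
  simp only [PySem.List.sum_map_add_int]
  rw [scatter_one grid (i + 1) j, scatter_one grid (i - 1) j,
    scatter_one grid i (j + 1), scatter_one grid i (j - 1)]
  simp only [pvCountAdjacentFarms, List.foldl_cons, List.foldl_nil,
    show i + ((-1 : Int), (0 : Int)).1 = i - 1 from by ring,
    show j + ((-1 : Int), (0 : Int)).2 = j from by ring,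
    show i + ((0 : Int), (-1 : Int)).1 = i from by ring,
    show j + ((0 : Int), (-1 : Int)).2 = j - 1 from by ring]
  split_ifs <;> norm_num

-- the scatter count at an in-range cell equals A's gathered farm count there
lemma pred_eq (grid : List (List String)) (i j : Int)
    (hi0 : 0 ≤ i) (hiR : i < (grid.length : Int))
    (hj0 : 0 ≤ j) (hjC : j < ((grid.headD []).length : Int)) :
    (((pvKeys grid).foldl (fun d k => d.modify k 0 (· + 1))
        (PySem.Dict.empty : PySem.Dict (Int × Int) Int)).getD (i, j) 0)
      = pvCountAdjacentFarms grid i j := by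
  rw [PySem.Dict.getD_foldl_modify_add_one]
  rw [show (PySem.Dict.empty : PySem.Dict (Int × Int) Int).getD (i, j) 0 = 0 from rfl, zero_add]
  exact keys_count grid i j hi0 hiR hj0 hjC

-- ===== VERDICT (by name: the statement is the Claim_ definition above) =====
theorem ulemswallow_spec : Claim_equal_ulemswallow := by
  intro grid _ _
  unfold Spec_ulemswallow
  cases grid with
  | nil => decide
  | cons hd tl =>
      simp only [ulemswallow, ulemswallow_alt]
      rw [if_neg (by simp; omega)]
      rw [dict_eq (hd :: tl)]
      congr 1
      apply List.foldl_ext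
      intro acc r hr
      apply List.foldl_ext
      intro acc c hc
      rw [PySem.List.mem_pyRange_one] at hr hc
      rw [pred_eq (hd :: tl) r c hr.1 hr.2 hc.1 hc.2]
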